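-- pv_equiv track=rewrite | github.com/Mahdi-Razi/kakuro | kakuro.py | legal_values
-- ===== SOURCE A (Python) =====
-- def find_boundary_position(board, row, col):
--     r = row
--     c = col
--     while board[r][col][1] == 0:
--         r -= 1
--     while board[row][c][1] == 0:
--         c -= 1
--
--     return r, c
--
-- def legal_values(board, pos):
--     row, col = pos
--     # initially values are in range 1 - 9
--     values = set(range(1, 10))
--     r, c = find_boundary_position(board, row, col)
--
--     while  c + 1 < len(board[0]) and board[row][c + 1][1] == 0:
--         # discard values from domain if they are already used in row
--         if board[row][c + 1][0] != 0:
--             values.discard(board[row][c + 1][0])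
--         c += 1
--
--     while r + 1 < len(board) and board[r + 1][col][1] == 0:
--         # discard values from domain if they are already used in col
--         if board[r + 1][col][0] != 0:
--             values.discard(board[r + 1][col][0])
--         r += 1
--
--     # return domain
--     return values
-- ===== SOURCE B (Python) =====
-- def legal_values(board, pos):
--     # Symmetric outward scans from pos instead of A's boundary-find-then-rescan:
--     # an open cell contributes its own value and the run cells left/above it;
--     # the runs headed to the right of / below pos are scanned the same way in both cases.
--     row, col = pos
--     n, m = len(board), len(board[0])
--     values = set(range(1, 10))
--     if board[row][col][1] == 0:
--         if board[row][col][0] != 0: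
--             values.discard(board[row][col][0])
--         c = col
--         while c - 1 >= 0 and board[row][c - 1][1] == 0:
--             c -= 1
--             if board[row][c][0] != 0:
--                 values.discard(board[row][c][0])
--         r = row
--         while r - 1 >= 0 and board[r - 1][col][1] == 0:
--             r -= 1
--             if board[r][col][0] != 0:
--                 values.discard(board[r][col][0])
--     c = col
--     while c + 1 < m and board[row][c + 1][1] == 0:
--         c += 1
--         if board[row][c][0] != 0:
--             values.discard(board[row][c][0])
--     r = row
--     while r + 1 < n and board[r + 1][col][1] == 0:
--         r += 1
--         if board[r][col][0] != 0:
--             values.discard(board[r][col][0])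
--     return values
-- ===== Notes on version B (the rewrite author's own statement) =====
-- stated objective: simpler
-- what changed: B drops find_boundary_position entirely: instead of walking backwards to the run boundary and then re-scanning forward over the whole row/column run, it discards an open cell's own value together with bounded leftward/upward scans and runs the rightward/downward scans directly from pos.
import Mathlib
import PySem

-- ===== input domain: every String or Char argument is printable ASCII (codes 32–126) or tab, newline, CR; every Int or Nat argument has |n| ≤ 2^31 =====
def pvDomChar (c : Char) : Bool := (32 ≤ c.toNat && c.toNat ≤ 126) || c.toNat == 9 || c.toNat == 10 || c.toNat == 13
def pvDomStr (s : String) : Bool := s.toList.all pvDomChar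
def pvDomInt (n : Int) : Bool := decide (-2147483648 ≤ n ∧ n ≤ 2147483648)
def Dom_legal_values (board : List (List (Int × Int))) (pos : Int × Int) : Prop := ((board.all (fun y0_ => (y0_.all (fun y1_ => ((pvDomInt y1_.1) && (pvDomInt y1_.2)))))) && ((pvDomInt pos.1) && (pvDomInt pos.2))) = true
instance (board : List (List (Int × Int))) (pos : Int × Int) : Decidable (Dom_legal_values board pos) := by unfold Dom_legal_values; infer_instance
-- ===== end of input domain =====

-- B replaces A's find-the-run-boundary-then-scan-forward structure by outward scans from
-- pos (objective: simpler); equivalence is proved on Pre_ (inputs on which A's unbounded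
-- backward boundary walk is tame).

-- shared subscript helper: board[r][c] (Python indexing, negative wrap included;
-- the defaults are only reached where Python would raise, outside Pre_)
def pvCell (board : List (List (Int × Int))) (r c : Int) : Int × Int :=
  (PySem.List.pyGet? ((PySem.List.pyGet? board r).getD []) c).getD (0, 0)

-- ===== PORT A =====
-- backward boundary walk 'while board[r][col][1] == 0: r -= 1'; Python bounds it only by
-- raising once r passes -len: the fuel passed below is enough for every step Python can
-- take, and under Pre_ the walk stops at a wall before the fuel (or Python's bound) is hit
def findBackI (wall : Int → Int) : Nat → Int → Int
  | 0, r => r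
  | f + 1, r => if wall r = 0 then findBackI wall f (r - 1) else r

-- forward scan 'while c + 1 < bound and board[..][c+1][1] == 0: (discard); c += 1'
def scanFwdA (wall val : Int → Int) (bound : Int) (c : Int) (s : PySem.Set Int) : PySem.Set Int :=
  if h : c + 1 < bound ∧ wall (c + 1) = 0 then
    scanFwdA wall val bound (c + 1) (if val (c + 1) ≠ 0 then PySem.Set.discard s (val (c + 1)) else s)
  else s
  termination_by (bound - c).toNat
  decreasing_by omega

def legal_values (board : List (List (Int × Int))) (pos : Int × Int) : List Int :=
  let row := pos.1
  let col := pos.2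
  let values : PySem.Set Int := PySem.Set.ofList (PySem.List.pyRange 1 10 1)
  -- find_boundary_position(board, row, col)
  let r := findBackI (fun i => (pvCell board i col).2) (row.toNat + board.length + 1) row
  let c := findBackI (fun j => (pvCell board row j).2)
      (col.toNat + ((PySem.List.pyGet? board row).getD []).length + 1) col
  let values := scanFwdA (fun j => (pvCell board row j).2) (fun j => (pvCell board row j).1)
      (((PySem.List.pyGet? board 0).getD []).length : Int) c values
  let values := scanFwdA (fun i => (pvCell board i col).2) (fun i => (pvCell board i col).1)
      (board.length : Int) r values
  values

-- ===== PORT B =====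
-- outward scan towards index 0: 'while c - 1 >= 0 and board[..][c-1][1] == 0: c -= 1; (discard)'
def scanOutB (wall val : Int → Int) (c : Int) (s : PySem.Set Int) : PySem.Set Int :=
  if h : c - 1 ≥ 0 ∧ wall (c - 1) = 0 then
    scanOutB wall val (c - 1) (if val (c - 1) ≠ 0 then PySem.Set.discard s (val (c - 1)) else s)
  else s
  termination_by c.toNat
  decreasing_by omega

-- outward scan away from index 0: 'while c + 1 < bound and board[..][c+1][1] == 0: c += 1; (discard)'
def scanInB (wall val : Int → Int) (bound : Int) (c : Int) (s : PySem.Set Int) : PySem.Set Int :=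
  if h : c + 1 < bound ∧ wall (c + 1) = 0 then
    scanInB wall val bound (c + 1) (if val (c + 1) ≠ 0 then PySem.Set.discard s (val (c + 1)) else s)
  else s
  termination_by (bound - c).toNat
  decreasing_by omega

def legal_values_alt (board : List (List (Int × Int))) (pos : Int × Int) : List Int :=
  let row := pos.1
  let col := pos.2
  let n : Int := (board.length : Int)
  let m : Int := (((PySem.List.pyGet? board 0).getD []).length : Int)
  let values : PySem.Set Int := PySem.Set.ofList (PySem.List.pyRange 1 10 1)
  let values :=
    if (pvCell board row col).2 = 0 then
      -- open cell: its own value and the run cells left of / above it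
      let values := if (pvCell board row col).1 ≠ 0 then
          PySem.Set.discard values (pvCell board row col).1 else values
      let values := scanOutB (fun j => (pvCell board row j).2)
          (fun j => (pvCell board row j).1) col values
      scanOutB (fun i => (pvCell board i col).2) (fun i => (pvCell board i col).1) row values
    else values
  let values := scanInB (fun j => (pvCell board row j).2)
      (fun j => (pvCell board row j).1) m col values
  let values := scanInB (fun i => (pvCell board i col).2)
      (fun i => (pvCell board i col).1) n row values
  values

-- ===== PRECONDITION & SPEC =====
-- Pre_ admits the inputs on which A's behaviour is tame: pos a valid (possibly negative)
-- Python index, every row non-empty with col valid in it, and the row of pos at least as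
-- long as row 0 (A's scan bound); on an open cell (second component 0) it further asks for
-- a rectangular board, non-negative pos and a wall cell strictly left of and above pos (as
-- Kakuro border walls guarantee).  Excluded while A still returns: open cells whose
-- backward boundary walk finds no wall at a non-negative index (A then scans accidental,
-- negatively-indexed wrapped cells) and ragged boards whose scan stops only by luck before
-- A's out-of-row bound raises; on those A's value is an artefact of Python index wrap.
def Pre_legal_values (board : List (List (Int × Int))) (pos : Int × Int) : Prop :=
  0 < board.length ∧ -(board.length : Int) ≤ pos.1 ∧ pos.1 < (board.length : Int) ∧
  (∀ rw ∈ board, rw ≠ [] ∧ -(rw.length : Int) ≤ pos.2 ∧ pos.2 < (rw.length : Int)) ∧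
  ((PySem.List.pyGet? board 0).getD []).length ≤ ((PySem.List.pyGet? board pos.1).getD []).length ∧
  ((pvCell board pos.1 pos.2).2 ≠ 0 ∨
    ((pvCell board pos.1 pos.2).2 = 0 ∧
      (∀ rw ∈ board, rw.length = ((PySem.List.pyGet? board 0).getD []).length) ∧
      0 ≤ pos.1 ∧ 0 ≤ pos.2 ∧
      (∃ r' ∈ List.range pos.1.toNat, (pvCell board (r' : Int) pos.2).2 ≠ 0) ∧
      (∃ c' ∈ List.range pos.2.toNat, (pvCell board pos.1 (c' : Int)).2 ≠ 0)))
instance (board : List (List (Int × Int))) (pos : Int × Int) : Decidable (Pre_legal_values board pos) := by unfold Pre_legal_values; infer_instance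

def pvWitness_legal_values : (List (List (Int × Int))) × (Int × Int) :=
  ([[(0, 1), (0, 1), (0, 1)], [(0, 1), (5, 0), (3, 0)]], (1, 1))

def Spec_legal_values (board : List (List (Int × Int))) (pos : Int × Int) (out : List Int) : Prop := out = legal_values_alt board pos
instance (board : List (List (Int × Int))) (pos : Int × Int) (out : List Int) : Decidable (Spec_legal_values board pos out) := by unfold Spec_legal_values; infer_instance

-- ===== CLAIM (what is proved, stated in full; the proofs are below) =====
def Claim_equal_legal_values : Prop := ∀ (board : List (List (Int × Int))) (pos : Int × Int), Dom_legal_values board pos → Pre_legal_values board pos → Spec_legal_values board pos (legal_values board pos)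

-- ===== LEMMAS AND PROOFS =====

-- proof-side Nat models of the loops (the scans only ever run over Nat indices inside Pre_)
def dstep (val : Nat → Int) : PySem.Set Int → Nat → PySem.Set Int :=
  fun s i => if val i ≠ 0 then PySem.Set.discard s (val i) else s

def findBack (wall : Nat → Int) : Nat → Nat
  | 0 => 0
  | r + 1 => if wall (r + 1) = 0 then findBack wall r else r + 1

def scanFwdN (wall val : Nat → Int) (bound : Nat) (c : Nat) (s : PySem.Set Int) : PySem.Set Int :=
  if h : c + 1 < bound ∧ wall (c + 1) = 0 then
    scanFwdN wall val bound (c + 1) (if val (c + 1) ≠ 0 then PySem.Set.discard s (val (c + 1)) else s)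
  else s
  termination_by bound - c
  decreasing_by omega

def scanOutN (wall val : Nat → Int) : Nat → PySem.Set Int → PySem.Set Int
  | 0, s => s
  | c + 1, s =>
    if wall c = 0 then scanOutN wall val c (if val c ≠ 0 then PySem.Set.discard s (val c) else s)
    else s

def runInc (wall : Nat → Int) (bound c : Nat) : List Nat :=
  if h : c + 1 < bound ∧ wall (c + 1) = 0 then (c + 1) :: runInc wall bound (c + 1) else []
  termination_by bound - c
  decreasing_by omega

def runDec (wall : Nat → Int) : Nat → List Nat
  | 0 => []
  | c + 1 => if wall c = 0 then c :: runDec wall c else []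

-- transfer: the Int-indexed port loops agree with the Nat models on cast arguments
theorem scanFwdA_natCast (wall val : Int → Int) (bn : Nat) :
    ∀ k cn s, bn - cn = k →
      scanFwdA wall val (bn : Int) (cn : Int) s
        = scanFwdN (fun i => wall (i : Int)) (fun i => val (i : Int)) bn cn s := by
  intro k
  induction k with
  | zero =>
    intro cn s hk
    rw [scanFwdA, scanFwdN, dif_neg (by omega), dif_neg (by omega)]
  | succ k ih =>
    intro cn s hk
    have hcast : ((cn : Int) + 1) = ((cn + 1 : Nat) : Int) := by push_cast; ring
    by_cases h : cn + 1 < bn ∧ wall ((cn : Int) + 1) = 0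
    · rw [scanFwdA, dif_pos ⟨by omega, h.2⟩, scanFwdN,
          dif_pos ⟨h.1, by rw [← hcast]; exact h.2⟩]
      rw [hcast, ih (cn + 1) _ (by omega)]
    · rw [scanFwdA, scanFwdN,
          dif_neg (fun hc => h ⟨by exact_mod_cast hc.1, hc.2⟩),
          dif_neg (fun hc => h ⟨hc.1, by rw [hcast]; exact hc.2⟩)]

theorem scanInB_eq_scanFwdA (wall val : Int → Int) (bound c : Int) (s : PySem.Set Int) :
    scanInB wall val bound c s = scanFwdA wall val bound c s := by
  fun_induction scanInB with
  | case1 c s h ih => rw [scanFwdA, dif_pos h]; exact ih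
  | case2 c s h => rw [scanFwdA, dif_neg h]

theorem scanOutB_natCast (wall val : Int → Int) :
    ∀ (cn : Nat) s, scanOutB wall val (cn : Int) s
      = scanOutN (fun i => wall (i : Int)) (fun i => val (i : Int)) cn s := by
  intro cn
  induction cn with
  | zero => intro s; rw [scanOutB, dif_neg (by omega)]; rfl
  | succ c ih =>
    intro s
    have hcast : (((c + 1 : Nat) : Int) - 1) = ((c : Nat) : Int) := by push_cast; ring
    by_cases h : wall ((c : Nat) : Int) = 0
    · rw [scanOutB, dif_pos ⟨by push_cast; omega, by rw [hcast]; exact h⟩, hcast, ih,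
          scanOutN, if_pos h]
    · rw [scanOutB, dif_neg (by rw [hcast]; exact fun hc => h hc.2), scanOutN, if_neg h]

theorem findBackI_natCast (wall : Int → Int) :
    ∀ (cn f : Nat), cn < f → (∃ j ≤ cn, wall (j : Int) ≠ 0) →
      findBackI wall f (cn : Int) = ((findBack (fun i => wall (i : Int)) cn : Nat) : Int) := by
  intro cn
  induction cn with
  | zero =>
    intro f hf hex
    obtain ⟨f', rfl⟩ : ∃ f', f = f' + 1 := ⟨f - 1, by omega⟩
    obtain ⟨j, hj, hw⟩ := hex
    have hj0 : j = 0 := by omega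
    rw [hj0] at hw
    rw [findBackI, if_neg (by exact_mod_cast hw)]
    rfl
  | succ c ih =>
    intro f hf hex
    obtain ⟨f', rfl⟩ : ∃ f', f = f' + 1 := ⟨f - 1, by omega⟩
    by_cases h : wall ((c + 1 : Nat) : Int) = 0
    · have hcast : (((c + 1 : Nat) : Int) - 1) = ((c : Nat) : Int) := by push_cast; ring
      have hex' : ∃ j ≤ c, wall (j : Int) ≠ 0 := by
        obtain ⟨j, hj, hw⟩ := hex
        refine ⟨j, ?_, hw⟩
        rcases Nat.lt_or_ge j (c + 1) with h1 | h1
        · omega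
        · exfalso
          have : j = c + 1 := by omega
          rw [this] at hw
          exact hw h
      rw [findBackI, if_pos h, hcast, ih f' (by omega) hex', findBack, if_pos (by exact h)]
    · rw [findBackI, if_neg h, findBack, if_neg (by exact h)]

theorem scanFwdN_eq_foldl (wall val : Nat → Int) (bound c : Nat) (s : PySem.Set Int) :
    scanFwdN wall val bound c s = (runInc wall bound c).foldl (dstep val) s := by
  fun_induction scanFwdN with
  | case1 c s h ih => rw [runInc, dif_pos h]; simpa [dstep] using ih
  | case2 c s h => rw [runInc, dif_neg h]; rfl

theorem scanOutN_eq_foldl (wall val : Nat → Int) (c : Nat) (s : PySem.Set Int) :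
    scanOutN wall val c s = (runDec wall c).foldl (dstep val) s := by
  induction c generalizing s with
  | zero => rfl
  | succ c ih =>
    by_cases h : wall c = 0
    · rw [scanOutN, if_pos h, runDec, if_pos h, List.foldl_cons, ih]; rfl
    · rw [scanOutN, if_neg h, runDec, if_neg h]; rfl

theorem foldl_dstep_filter (val : Nat → Int) (L : List Nat) (s : PySem.Set Int) :
    L.foldl (dstep val) s
      = s.filter (fun x => !(L.any (fun i => val i == x && !(val i == 0)))) := by
  induction L generalizing s with
  | nil => simp
  | cons i L ih =>
    rw [List.foldl_cons, ih]
    have hs : dstep val s i = s.filter (fun x => !(val i == x && !(val i == 0))) := by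
      by_cases h : val i = 0
      · simp [dstep, h]
      · simp only [dstep, if_pos (by exact h)]
        apply List.filter_congr
        intro x _
        rw [Bool.eq_iff_iff]
        simp [h]
        exact ⟨fun hn e => hn e.symm, fun hn e => hn e.symm⟩
    rw [hs, List.filter_filter]
    apply List.filter_congr
    intro x _
    simp only [List.any_cons, Bool.not_or]
    rw [Bool.and_comm]

theorem findBack_le (wall : Nat → Int) (r : Nat) : findBack wall r ≤ r := by
  induction r with
  | zero => exact Nat.le_refl 0
  | succ r ih => rw [findBack]; split <;> omega

theorem findBack_between (wall : Nat → Int) (r : Nat) :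
    ∀ i, findBack wall r < i → i ≤ r → wall i = 0 := by
  induction r with
  | zero => intro i h1 h2; omega
  | succ r ih =>
    intro i h1 h2
    rw [findBack] at h1
    by_cases h : wall (r + 1) = 0
    · rw [if_pos h] at h1
      rcases Nat.lt_or_ge i (r + 1) with hi | hi
      · exact ih i h1 (by omega)
      · have : i = r + 1 := by omega
        rw [this]; exact h
    · rw [if_neg h] at h1; omega

theorem findBack_wall (wall : Nat → Int) (r : Nat) (h : ∃ j ≤ r, wall j ≠ 0) :
    wall (findBack wall r) ≠ 0 := by
  induction r with
  | zero =>
    obtain ⟨j, hj, hw⟩ := h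
    have : j = 0 := by omega
    rw [findBack]; rw [this] at hw; exact hw
  | succ r ih =>
    rw [findBack]
    by_cases hw : wall (r + 1) = 0
    · rw [if_pos hw]
      apply ih
      obtain ⟨j, hj, hne⟩ := h
      refine ⟨j, ?_, hne⟩
      rcases Nat.lt_or_ge j (r + 1) with h1 | h1
      · omega
      · exfalso
        have hj1 : j = r + 1 := by omega
        rw [hj1] at hne
        exact hne hw
    · rw [if_neg hw]; exact hw

theorem runInc_prefix (wall : Nat → Int) (bound : Nat) :
    ∀ n cb C, cb + n = C → C < bound → (∀ i, cb < i → i ≤ C → wall i = 0) →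
      runInc wall bound cb = List.range' (cb + 1) (C - cb) ++ runInc wall bound C := by
  intro n
  induction n with
  | zero =>
    intro cb C h hb hw
    have hc : cb = C := by omega
    subst hc
    simp
  | succ n ih =>
    intro cb C h hb hw
    have h1 : cb + 1 < bound := by omega
    have h2 : wall (cb + 1) = 0 := hw (cb + 1) (by omega) (by omega)
    rw [runInc, dif_pos ⟨h1, h2⟩]
    rw [ih (cb + 1) C (by omega) hb (fun i hi1 hi2 => hw i (by omega) hi2)]
    have hr : List.range' (cb + 1) (C - cb) = (cb + 1) :: List.range' (cb + 2) (C - (cb + 1)) := by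
      have : C - cb = (C - (cb + 1)) + 1 := by omega
      rw [this, List.range'_succ]
    rw [hr]; rfl

theorem runDec_eq (wall : Nat → Int) :
    ∀ n cb C, cb + n = C → 0 < n → wall cb ≠ 0 → (∀ i, cb < i → i < C → wall i = 0) →
      runDec wall C = (List.range' (cb + 1) (C - cb - 1)).reverse := by
  intro n
  induction n with
  | zero => intro cb C h h0; omega
  | succ n ih =>
    intro cb C h h0 hwall hbet
    rcases Nat.eq_zero_or_pos n with hn | hn
    · have : C = cb + 1 := by omega
      subst this
      rw [runDec, if_neg hwall]
      simp
    · have hC : C = (C - 1) + 1 := by omega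
      rw [hC, runDec]
      have hw1 : wall (C - 1) = 0 := hbet (C - 1) (by omega) (by omega)
      rw [if_pos hw1]
      rw [ih cb (C - 1) (by omega) hn hwall (fun i hi1 hi2 => hbet i hi1 (by omega))]
      have h2 : C - 1 + 1 - cb - 1 = ((C - 1) - cb - 1) + 1 := by omega
      rw [h2, List.range'_concat]
      have : cb + 1 + 1 * (C - 1 - cb - 1) = C - 1 := by omega
      rw [this, List.reverse_append]
      simp

-- ===== VERDICT (by name: the statement is the Claim_ definition above) =====
theorem legal_values_spec : Claim_equal_legal_values := by
  intro board pos _dom hpre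
  unfold Spec_legal_values
  obtain ⟨hn, hrlo, hrhi, hrows, hlen0, hbranch⟩ := hpre
  show legal_values board pos = legal_values_alt board pos
  simp only [legal_values, legal_values_alt]
  rcases hbranch with hwall | ⟨hentry, hrect, hr0, hc0, ⟨r', hr'mem, hr'w⟩, ⟨c', hc'mem, hc'w⟩⟩
  · -- pos is a wall cell: both boundary walks stop at pos at once, and B's open-cell
    -- branch is skipped, leaving the identical rightward/downward scans on both sides
    rw [if_neg hwall, findBackI, if_neg hwall, findBackI, if_neg hwall,
        scanInB_eq_scanFwdA, scanInB_eq_scanFwdA]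
  · -- pos is an open cell with a wall left and above: transfer to the Nat models
    rw [if_pos hentry]
    set R := pos.1.toNat with hRdef
    set C := pos.2.toNat with hCdef
    have hR : (R : Int) = pos.1 := Int.toNat_of_nonneg hr0
    have hC : (C : Int) = pos.2 := Int.toNat_of_nonneg hc0
    rw [← hR] at hrhi
    rw [← hR, ← hC] at hentry
    rw [← hR, ← hC]
    set wallR := fun j : Nat => (pvCell board (R : Int) (j : Int)).2 with hwallR
    set valR := fun j : Nat => (pvCell board (R : Int) (j : Int)).1 with hvalR
    set wallC := fun i : Nat => (pvCell board (i : Int) (C : Int)).2 with hwallC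
    set valC := fun i : Nat => (pvCell board (i : Int) (C : Int)).1 with hvalC
    set nr := board.length with hnrdef
    set m := ((PySem.List.pyGet? board 0).getD []).length with hmdef
    have hexC : ∃ j ≤ C, wallR j ≠ 0 := by
      refine ⟨c', ?_, by simpa [hwallR, hR] using hc'w⟩
      rw [List.mem_range] at hc'mem; omega
    have hexR : ∃ j ≤ R, wallC j ≠ 0 := by
      refine ⟨r', ?_, by simpa [hwallC, hC] using hr'w⟩
      rw [List.mem_range] at hr'mem; omega
    rw [findBackI_natCast _ C _ (by omega) (by exact hexC),
        findBackI_natCast _ R _ (by omega) (by exact hexR)]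
    rw [scanFwdA_natCast _ _ _ (m - findBack wallR C) _ _ rfl,
        scanFwdA_natCast _ _ _ (nr - findBack wallC R) _ _ rfl,
        scanOutB_natCast, scanOutB_natCast,
        scanInB_eq_scanFwdA, scanInB_eq_scanFwdA,
        scanFwdA_natCast _ _ _ (m - C) _ _ rfl,
        scanFwdA_natCast _ _ _ (nr - R) _ _ rfl]
    -- boundary facts
    set cb := findBack wallR C with hcbdef
    set rb := findBack wallC R with hrbdef
    have hwRC : wallR C = 0 := hentry
    have hcbw : wallR cb ≠ 0 := findBack_wall wallR C hexC
    have hrbw : wallC rb ≠ 0 := findBack_wall wallC R hexR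
    have hcble : cb ≤ C := findBack_le wallR C
    have hrble : rb ≤ R := findBack_le wallC R
    have hcblt : cb < C := by
      rcases Nat.lt_or_ge cb C with h | h
      · exact h
      · exfalso; have : cb = C := by omega
        rw [this] at hcbw; exact hcbw hwRC
    have hwCR : wallC R = 0 := by
      rw [hwallC]; exact hentry
    have hrblt : rb < R := by
      rcases Nat.lt_or_ge rb R with h | h
      · exact h
      · exfalso; have : rb = R := by omega
        rw [this] at hrbw; exact hrbw hwCR
    have hbetR : ∀ i, cb < i → i ≤ C → wallR i = 0 := findBack_between wallR C
    have hbetC : ∀ i, rb < i → i ≤ R → wallC i = 0 := findBack_between wallC R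
    -- bounds
    have hRlt : R < nr := by omega
    have hClt : C < m := by
      have hmem : board[R] ∈ board := List.getElem_mem hRlt
      have h1 := (hrows board[R] hmem).2.2
      have h2 := hrect board[R] hmem
      rw [← hC] at h1
      have h3 : C < board[R].length := by exact_mod_cast h1
      omega
    -- own-cell discard of B is one dstep at index C
    have hown : (if (pvCell board (R : Int) (C : Int)).1 ≠ 0 then
          PySem.Set.discard (PySem.Set.ofList (PySem.List.pyRange 1 10)) (pvCell board (R : Int) (C : Int)).1
        else PySem.Set.ofList (PySem.List.pyRange 1 10))
        = dstep valR (PySem.Set.ofList (PySem.List.pyRange 1 10)) C := by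
      rw [dstep, hvalR]
    rw [hown]
    rw [scanFwdN_eq_foldl, scanFwdN_eq_foldl, scanFwdN_eq_foldl, scanFwdN_eq_foldl,
        scanOutN_eq_foldl, scanOutN_eq_foldl]
    -- the run lists, characterised
    rw [runInc_prefix wallR m (C - cb) cb C (by omega) hClt hbetR]
    rw [runInc_prefix wallC nr (R - rb) rb R (by omega) hRlt hbetC]
    rw [runDec_eq wallR (C - cb) cb C (by omega) (by omega) hcbw
          (fun i h1 h2 => hbetR i h1 (by omega))]
    rw [runDec_eq wallC (R - rb) rb R (by omega) (by omega) hrbw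
          (fun i h1 h2 => hbetC i h1 (by omega))]
    have hsingle : dstep valR (PySem.Set.ofList (PySem.List.pyRange 1 10)) C
        = List.foldl (dstep valR) (PySem.Set.ofList (PySem.List.pyRange 1 10)) [C] := rfl
    rw [hsingle]
    simp only [foldl_dstep_filter, List.filter_filter]
    apply List.filter_congr
    intro x hx
    rw [Bool.eq_iff_iff]
    simp only [Bool.and_eq_true, Bool.not_eq_true', List.any_eq_false, List.mem_append,
      List.mem_reverse, List.mem_singleton, beq_eq_false_iff_ne, ne_eq, beq_iff_eq]
    have hvRC : valR C = valC R := by rw [hvalR, hvalC]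
    have hmemC : ∀ i : Nat, i ∈ List.range' (cb + 1) (C - cb) ↔
        (i ∈ List.range' (cb + 1) (C - cb - 1) ∨ i = C) := by
      intro i; simp only [List.mem_range'_1]; omega
    have hmemR : ∀ i : Nat, i ∈ List.range' (rb + 1) (R - rb) ↔
        (i ∈ List.range' (rb + 1) (R - rb - 1) ∨ i = R) := by
      intro i; simp only [List.mem_range'_1]; omega
    constructor
    · rintro ⟨hcol, hrow⟩
      exact ⟨fun i hi => hcol i (Or.inr hi),
        fun i hi => hrow i (Or.inr hi),
        fun i hi => hcol i (Or.inl ((hmemR i).mpr (Or.inl hi))),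
        fun i hi => hrow i (Or.inl ((hmemC i).mpr (Or.inl hi))),
        fun i hi => by subst hi; exact hrow C (Or.inl ((hmemC C).mpr (Or.inr rfl)))⟩
    · rintro ⟨h1, h2, h3, h4, h5⟩
      constructor
      · intro i hi
        rcases hi with hi | hi
        · rcases (hmemR i).mp hi with hi' | hi'
          · exact h3 i hi'
          · subst hi'
            intro hcontra
            exact h5 C rfl (by rw [hvRC]; exact hcontra)
        · exact h1 i hi
      · intro i hi
        rcases hi with hi | hi
        · rcases (hmemC i).mp hi with hi' | hi'
          · exact h4 i hi'
          · subst hi'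
            exact h5 C rfl
        · exact h2 i hi
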